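-- pv_equiv track=rewrite | github.com/MiniAppleTheApple/tic-tac-toe-python | main.py | text_format_table
-- ===== SOURCE A (Python) =====
-- SIZE = 3
--
-- def text_format_table(table):
--     text = ""
--     for x, v in enumerate(table):
--         if x % SIZE == 0 and x != 0:
--             text += "|\n"
--
--         text += f"|{v}"
--
--     text += "|"
--
--     return text
-- ===== SOURCE B (Python) =====
-- SIZE = 3
--
-- def text_format_table(table):
--     if not table:
--         return "|"
--     rows = [table[i:i + SIZE] for i in range(0, len(table), SIZE)]
--     return "\n".join("|" + "|".join(row) + "|" for row in rows)
-- ===== Notes on version B (the rewrite author's own statement) =====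
-- stated objective: simpler
-- what changed: Replaces A's flat enumerate loop with its modulo-3 separator test and growing string accumulator by a row-wise decomposition: slice the list into SIZE-cell rows with a range-step comprehension, format each row as '|' + '|'.join(row) + '|', and join the rows with newlines (empty input keeps A's '|').
import Mathlib
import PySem

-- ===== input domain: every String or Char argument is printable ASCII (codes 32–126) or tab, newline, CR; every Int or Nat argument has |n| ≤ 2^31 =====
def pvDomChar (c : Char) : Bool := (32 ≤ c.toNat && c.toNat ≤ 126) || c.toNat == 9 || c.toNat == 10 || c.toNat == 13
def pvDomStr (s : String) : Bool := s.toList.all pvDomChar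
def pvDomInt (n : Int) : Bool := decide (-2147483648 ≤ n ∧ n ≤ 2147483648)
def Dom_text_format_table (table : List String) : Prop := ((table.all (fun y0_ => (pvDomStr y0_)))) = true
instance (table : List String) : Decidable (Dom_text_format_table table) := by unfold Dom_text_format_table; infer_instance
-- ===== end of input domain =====

-- B replaces A's flat index loop with its modulo-3 separator test by row-wise chunking:
-- slice the list into SIZE-cell rows, format each as '|'+'|'.join(row)+'|', join with newlines (objective: simpler).

-- ===== PORT A =====
-- loop body of A: the separator test, then text += f"|{v}"
def pvStepA (text : String) (xv : Int × String) : String :=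
  (if PySem.Int.mod xv.1 3 == 0 && xv.1 != 0 then text ++ "|\n" else text) ++ ("|" ++ xv.2)

def text_format_table (table : List String) : String :=
  ((PySem.List.enumerate table 0).foldl pvStepA "") ++ "|"

-- ===== PORT B =====
def text_format_table_alt (table : List String) : String :=
  if table = [] then "|"
  else
    let rows := (PySem.List.pyRange 0 (table.length : Int) 3).map
      (fun i => PySem.List.slice table (some i) (some (i + 3)))
    PySem.Str.join "\n" (rows.map (fun row => "|" ++ PySem.Str.join "|" row ++ "|"))

-- ===== PRECONDITION & SPEC =====
def Spec_text_format_table (table : List String) (out : String) : Prop := out = text_format_table_alt table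
instance (table : List String) (out : String) : Decidable (Spec_text_format_table table out) := by unfold Spec_text_format_table; infer_instance

-- ===== CLAIM (what is proved, stated in full; the proofs are below) =====
def Claim_equal_text_format_table : Prop := ∀ (table : List String), Dom_text_format_table table → Spec_text_format_table table (text_format_table table)

-- ===== LEMMAS AND PROOFS =====

-- A-side: the fold's accumulator is a pure prefix
lemma foldl_stepA_acc (l : List (Int × String)) (t : String) :
    l.foldl pvStepA t = t ++ l.foldl pvStepA "" := by
  induction l generalizing t with
  | nil => simp
  | cons x l ih =>
    simp only [List.foldl_cons]
    rw [ih, ih (pvStepA "" x)]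
    simp [pvStepA]
    split_ifs <;> simp [String.append_assoc]

-- A-side: the starting index only matters through (· mod 3, · = 0)
lemma catA_cong (l : List String) (s1 s2 : Int) (h1 : 0 < s1) (h2 : 0 < s2)
    (hm : PySem.Int.mod s1 3 = PySem.Int.mod s2 3) :
    (PySem.List.enumerate l s1).foldl pvStepA "" = (PySem.List.enumerate l s2).foldl pvStepA "" := by
  induction l generalizing s1 s2 with
  | nil => simp [PySem.List.enumerate]
  | cons d l ih =>
    rw [PySem.List.enumerate_cons, PySem.List.enumerate_cons,
        List.foldl_cons, List.foldl_cons, foldl_stepA_acc, foldl_stepA_acc (t := pvStepA "" (s2, d))]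
    rw [ih (s1+1) (s2+1) (by omega) (by omega)
          (by simp [PySem.Int.mod, Int.fmod_eq_emod] at hm ⊢; omega)]
    have : pvStepA "" (s1, d) = pvStepA "" (s2, d) := by
      have hiff : (3 ∣ s1 ∧ ¬s1 = 0) ↔ (3 ∣ s2 ∧ ¬s2 = 0) := by
        simp [PySem.Int.mod, Int.fmod_eq_emod] at hm; omega
      simp [pvStepA, hiff]
    rw [this]

-- A-side: restarting the fold at a positive multiple of 3 only inserts the row separator
lemma shiftA (l : List String) (hl : l ≠ []) (s : Int) (h1 : 0 < s) (hm : PySem.Int.mod s 3 = 0) :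
    (PySem.List.enumerate l s).foldl pvStepA "" =
      "|\n" ++ (PySem.List.enumerate l 0).foldl pvStepA "" := by
  cases l with
  | nil => exact absurd rfl hl
  | cons d l =>
    rw [PySem.List.enumerate_cons, PySem.List.enumerate_cons,
        List.foldl_cons, List.foldl_cons, foldl_stepA_acc, foldl_stepA_acc (t := pvStepA "" (0, d))]
    rw [catA_cong l (s+1) 1 (by omega) (by omega)
          (by simp [PySem.Int.mod, Int.fmod_eq_emod] at hm ⊢; omega)]
    have hs : pvStepA "" (s, d) = "|\n" ++ pvStepA "" (0, d) := by
      have h3 : (3 ∣ s ∧ ¬s = 0) := by simp [PySem.Int.mod, Int.fmod_eq_emod] at hm; omega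
      simp [pvStepA, h3]
    rw [hs, String.append_assoc, zero_add]

-- B-side: structural forms of range(a, b, 3)
lemma pyRange3_cons (a b : Int) (h : a < b) :
    PySem.List.pyRange a b 3 = a :: PySem.List.pyRange (a+3) b 3 := by
  rw [PySem.List.pyRange_of_pos a b (by omega), PySem.List.pyRange_of_pos (a+3) b (by omega)]
  by_cases h3 : a + 3 < b
  · rw [if_pos h, if_pos h3]
    have hc : ((b - a + 3 - 1) / 3).toNat = ((b - (a+3) + 3 - 1) / 3).toNat + 1 := by omega
    rw [hc, List.range_succ_eq_map]
    simp only [List.map_cons, List.map_map]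
    refine List.cons_eq_cons.mpr ⟨by push_cast; ring, ?_⟩
    apply List.map_congr_left; intro k _; simp [Function.comp, Nat.succ_eq_add_one]; ring
  · rw [if_pos h, if_neg h3]
    have hc : ((b - a + 3 - 1) / 3).toNat = 1 := by omega
    simp [hc, List.range_succ]

lemma pyRange3_shift (n : Int) :
    PySem.List.pyRange 3 n 3 = (PySem.List.pyRange 0 (n-3) 3).map (· + 3) := by
  rw [PySem.List.pyRange_of_pos 3 n (by omega), PySem.List.pyRange_of_pos 0 (n-3) (by omega)]
  by_cases h : 3 < n
  · rw [if_pos h, if_pos (by omega : (0:Int) < n - 3)]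
    have hc : ((n - 3 + 3 - 1) / 3).toNat = ((n - 3 - 0 + 3 - 1) / 3).toNat := by omega
    rw [hc, List.map_map]
    apply List.map_congr_left; intro k _; simp [Function.comp]; ring
  · rw [if_neg h, if_neg (by omega : ¬ (0:Int) < n - 3)]; simp

-- B-side: the list of rows produced by the comprehension
def rowsR (t : List String) : List (List String) :=
  (PySem.List.pyRange 0 (t.length : Int) 3).map (fun i => PySem.List.slice t (some i) (some (i + 3)))

lemma rowsR_chunk (a b c : String) (rest : List String) :
    rowsR (a :: b :: c :: rest) = [a, b, c] :: rowsR rest := by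
  unfold rowsR
  have hlen : ((a :: b :: c :: rest).length : Int) = (rest.length : Int) + 3 := by simp; ring
  rw [hlen, pyRange3_cons 0 _ (by omega), List.map_cons]
  have h03 : (0:Int) + 3 = 3 := by ring
  rw [h03]
  refine List.cons_eq_cons.mpr ⟨?_, ?_⟩
  · rw [PySem.List.slice_toNat _ (by omega) (by omega)]
    simp
  · rw [pyRange3_shift, List.map_map]
    have : ((rest.length : Int) + 3) - 3 = (rest.length : Int) := by ring
    rw [this]
    apply List.map_congr_left
    intro i hi
    have h0i : 0 ≤ i := ((PySem.List.mem_pyRange_iff_of_pos (by omega) i).mp hi).1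
    simp only [Function.comp]
    rw [PySem.List.slice_toNat _ (by omega) (by omega),
        PySem.List.slice_toNat _ (by omega) (by omega)]
    have h1 : (i + 3).toNat = i.toNat + 3 := by omega
    have h2 : (i + 3 + 3).toNat - (i.toNat + 3) = 3 := by omega
    have h3 : i.toNat + 3 - i.toNat = 3 := by omega
    rw [h1, h2, h3]
    simp

lemma rowsR_small (t : List String) (hne : t ≠ []) (hle : t.length ≤ 3) : rowsR t = [t] := by
  unfold rowsR
  have h0 : (0:Int) < (t.length : Int) := by
    have : t.length ≠ 0 := fun h => hne (List.eq_nil_of_length_eq_zero h)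
    omega
  rw [pyRange3_cons 0 _ h0]
  have hnil : PySem.List.pyRange (0+3) (t.length : Int) 3 = [] := by
    rw [PySem.List.pyRange_of_pos _ _ (by omega), if_neg (by push_cast; omega)]
    simp
  rw [hnil]
  simp
  rw [PySem.List.slice_to _ (by omega : (0:Int) ≤ 3)]
  simp [List.take_of_length_le hle]

lemma altB_ne (t : List String) (hne : t ≠ []) :
    text_format_table_alt t =
      PySem.Str.join "\n" ((rowsR t).map (fun row => "|" ++ PySem.Str.join "|" row ++ "|")) := by
  simp [text_format_table_alt, rowsR, hne]

lemma altB_toList (a b c : String) (rest : List String) :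
    (text_format_table_alt (a :: b :: c :: rest)).toList =
      '|' :: a.toList ++ '|' :: b.toList ++ '|' :: c.toList ++ ['|'] ++
        (if rest = [] then [] else '\n' :: (text_format_table_alt rest).toList) := by
  rw [altB_ne _ (by simp), rowsR_chunk]
  cases rest with
  | nil =>
    simp [rowsR, PySem.List.pyRange_of_pos 0 0 (by omega : (0:Int) < 3),
      PySem.Str.toList_join, PySem.Chars.join_singleton, PySem.Chars.join_cons_cons]
  | cons d l =>
    have hne : rowsR (d :: l) ≠ [] := by
      unfold rowsR
      rw [pyRange3_cons 0 _ (by simp)]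
      simp
    rw [altB_ne (d :: l) (by simp)]
    cases hr : rowsR (d :: l) with
    | nil => exact absurd hr hne
    | cons r rs =>
      simp [PySem.Str.toList_join, PySem.Chars.join_cons_cons, PySem.Chars.join_singleton]

theorem mainA (table : List String) : text_format_table table = text_format_table_alt table := by
  match table with
  | [] =>
    simp [text_format_table, text_format_table_alt, PySem.List.enumerate]
  | [a] =>
    rw [altB_ne _ (by simp), rowsR_small _ (by simp) (by simp), ← String.toList_inj]
    simp [text_format_table, PySem.List.enumerate, pvStepA, PySem.Int.mod,
      PySem.Str.toList_join, PySem.Chars.join_singleton]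
  | [a, b] =>
    rw [altB_ne _ (by simp), rowsR_small _ (by simp) (by simp), ← String.toList_inj]
    simp [text_format_table, PySem.List.enumerate, pvStepA, PySem.Int.mod, Int.fmod_eq_emod,
      PySem.Str.toList_join, PySem.Chars.join_cons_cons, PySem.Chars.join_singleton]
  | a :: b :: c :: rest =>
    have ih := mainA rest
    rw [← String.toList_inj, altB_toList]
    simp only [text_format_table, PySem.List.enumerate_cons, List.foldl_cons]
    norm_num
    rw [foldl_stepA_acc]
    cases rest with
    | nil =>
      simp [PySem.List.enumerate, pvStepA, PySem.Int.mod, Int.fmod_eq_emod]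
    | cons d l =>
      rw [shiftA (d :: l) (by simp) 3 (by omega) (by decide)]
      simp only [text_format_table] at ih
      rw [← String.toList_inj] at ih
      simp [pvStepA, PySem.Int.mod, Int.fmod_eq_emod] at ih ⊢
      rw [← ih]
termination_by table.length

-- ===== VERDICT (by name: the statement is the Claim_ definition above) =====
theorem text_format_table_spec : Claim_equal_text_format_table := by
  intro t _
  unfold Spec_text_format_table
  exact mainA t
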